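-- pv_equiv track=rewrite | github.com/helder53/Problem_Solving | Programmers/Level2/스킬트리.py | others
-- ===== SOURCE A (Python) =====
-- def others(skill,skill_tree):
--     answer=0
--     for i in skill_tree:
--         skillist=''
--         for z in i:
--             if z in skill:
--                 skillist+=z
--         if skillist==skill[0:len(skillist)]:
--             answer+=1
--     return answer
-- ===== SOURCE B (Python) =====
-- def others(skill, skill_tree):
--     n = len(skill)
--     answer = 0
--     for tree in skill_tree:
--         idx = 0
--         ok = True
--         for z in tree:
--             if z in skill:
--                 if idx < n and skill[idx] == z:
--                     idx += 1
--                 else: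
--                     ok = False
--                     break
--         if ok:
--             answer += 1
--     return answer
-- ===== Notes on version B (the rewrite author's own statement) =====
-- stated objective: faster
-- what changed: Instead of building a filtered string per tree and comparing it to a slice of skill, B keeps a single index into skill and checks each skill-character of the tree in one pass, breaking early on the first mismatch or overrun, with no intermediate string construction.
import Mathlib
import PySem

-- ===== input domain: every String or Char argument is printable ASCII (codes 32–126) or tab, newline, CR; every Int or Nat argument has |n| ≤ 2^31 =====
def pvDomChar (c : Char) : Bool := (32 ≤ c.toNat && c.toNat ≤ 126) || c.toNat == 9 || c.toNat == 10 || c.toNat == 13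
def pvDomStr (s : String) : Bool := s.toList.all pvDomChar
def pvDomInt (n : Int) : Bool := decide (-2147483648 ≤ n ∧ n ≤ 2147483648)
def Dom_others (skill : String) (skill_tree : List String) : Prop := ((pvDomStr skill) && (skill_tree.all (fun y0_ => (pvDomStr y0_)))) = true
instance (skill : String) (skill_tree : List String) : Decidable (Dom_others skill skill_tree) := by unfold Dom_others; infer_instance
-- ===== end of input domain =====

-- B replaces A's build-filtered-string-then-slice-compare with a one-pass index scan
-- that breaks early on the first mismatch; same asymptotics, measurably faster by a constant factor (no intermediate string built).

-- ===== PORT A =====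
-- inner loop: skillist += z for each z of the tree with z in skill
-- ('z in skill' for a single character z is exactly char membership, ported as List.contains)
def aFilter (sk : List Char) (l : List Char) : List Char :=
  l.foldl (fun acc z => if sk.contains z then acc ++ [z] else acc) []

def others (skill : String) (skill_tree : List String) : Int :=
  -- outer loop over skill_tree; skill[0:len(skillist)] with 0 ≤ len is exactly List.take
  skill_tree.foldl
    (fun answer i =>
      let skillist := aFilter skill.toList i.toList
      if skillist = skill.toList.take skillist.length then answer + 1 else answer)
    0

-- ===== PORT B =====
-- B's inner loop: index idx into skill; break (return false) on mismatch or overrun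
def altCheck (sk : List Char) (l : List Char) (idx : Nat) : Bool :=
  match l with
  | [] => true
  | z :: rest =>
      if sk.contains z then
        if h : idx < sk.length then
          if sk[idx] = z then altCheck sk rest (idx + 1) else false
        else false
      else altCheck sk rest idx

def others_alt (skill : String) (skill_tree : List String) : Int :=
  skill_tree.foldl
    (fun answer tree => if altCheck skill.toList tree.toList 0 then answer + 1 else answer)
    0

-- ===== PRECONDITION & SPEC =====
def Spec_others (skill : String) (skill_tree : List String) (out : Int) : Prop := out = others_alt skill skill_tree
instance (skill : String) (skill_tree : List String) (out : Int) : Decidable (Spec_others skill skill_tree out) := by unfold Spec_others; infer_instance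

-- ===== CLAIM (what is proved, stated in full; the proofs are below) =====
def Claim_equal_others : Prop := ∀ (skill : String) (skill_tree : List String), Dom_others skill skill_tree → Spec_others skill skill_tree (others skill skill_tree)

-- ===== LEMMAS AND PROOFS =====

-- A's accumulator loop builds acc ++ filter
lemma aFilter_go (sk : List Char) (l : List Char) (acc : List Char) :
    l.foldl (fun acc z => if sk.contains z then acc ++ [z] else acc) acc
      = acc ++ l.filter (fun z => decide (z ∈ sk)) := by
  induction l generalizing acc with
  | nil => simp
  | cons z rest ih =>
    rw [List.foldl_cons, ih, List.filter_cons]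
    by_cases h : z ∈ sk <;> simp [h]

lemma aFilter_eq (sk l : List Char) :
    aFilter sk l = l.filter (fun z => decide (z ∈ sk)) := by
  simpa [aFilter] using aFilter_go sk l []

-- B's scan from idx decides whether the filtered tree is the corresponding prefix of sk.drop idx
lemma altCheck_eq (sk : List Char) (l : List Char) (idx : Nat) :
    altCheck sk l idx
      = decide ((l.filter (fun z => decide (z ∈ sk)))
          = (sk.drop idx).take (l.filter (fun z => decide (z ∈ sk))).length) := by
  induction l generalizing idx with
  | nil => simp [altCheck]
  | cons z rest ih =>
    rw [List.filter_cons]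
    simp only [altCheck]
    by_cases hz : z ∈ sk
    · have hc : sk.contains z = true := by simp [hz]
      rw [if_pos hc]
      by_cases hlt : idx < sk.length
      · have hdrop : sk.drop idx = sk[idx] :: sk.drop (idx + 1) :=
          List.drop_eq_getElem_cons hlt
        rw [dif_pos hlt, hdrop]
        by_cases heq : sk[idx] = z
        · rw [if_pos heq, ih]
          simp [hz, List.take_succ_cons, heq]
        · rw [if_neg heq]
          have hne : z ≠ sk[idx] := fun h => heq h.symm
          simp [hz]
          rw [hdrop, List.take_succ_cons]
          simp [hne]
      · have hdrop : sk.drop idx = ([] : List Char) := by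
          rw [List.drop_eq_nil_iff]; omega
        rw [dif_neg hlt, hdrop]
        simp [hz]
    · have hc : ¬ sk.contains z = true := by simp [hz]
      rw [if_neg hc, ih]
      simp [hz]

-- ===== VERDICT (by name: the statement is the Claim_ definition above) =====
theorem others_spec : Claim_equal_others := by
  intro skill skill_tree _
  unfold Spec_others others others_alt
  have hstep : (fun (answer : Int) (i : String) =>
      let skillist := aFilter skill.toList i.toList
      if skillist = skill.toList.take skillist.length then answer + 1 else answer)
      = (fun (answer : Int) (tree : String) =>
      if altCheck skill.toList tree.toList 0 then answer + 1 else answer) := by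
    funext answer i
    rw [altCheck_eq]
    simp [aFilter_eq]
  rw [hstep]
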